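-- pv_equiv track=rewrite | github.com/BT-C/MMCV | runner/epoch_based_runner.py | get_all_grad_file
-- ===== SOURCE A (Python) =====
-- def get_all_grad_file(file_list, world_size):
--     for i in range(len(file_list)):
--         file_list[i] = f"iter_{file_list[i].split('_')[1].zfill(6)}_gpu_{file_list[i].split('_')[-1].split('.')[0]}.pt"
--     file_list.sort()
--     out_file = []
--     for i in range(world_size):
--         out_file.extend(file_list[i::world_size])
--     assert len(out_file) == len(file_list)
--     for i in range(len(out_file)):
--         out_file[i] = f"iter_{int(out_file[i].split('_')[1])}_gpu_{out_file[i].split('_')[-1].split('.')[0]}.pt"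
--
--     return out_file
-- ===== SOURCE B (Python) =====
-- def get_all_grad_file(file_list, world_size):
--     for i, name in enumerate(file_list):
--         it, gpu = name.split('_')[1], name.split('_')[-1].split('.')[0]
--         file_list[i] = "iter_%s_gpu_%s.pt" % (it.zfill(6), gpu)
--     file_list.sort()
--     # chunk into rows of world_size, then read off column by column
--     rows = [file_list[j:j + world_size] for j in range(0, len(file_list), world_size)]
--     out = []
--     while rows:
--         out += [row[0] for row in rows]
--         rows = [row[1:] for row in rows if len(row) > 1]
--     return ["iter_%d_gpu_%s.pt" % (int(n.split('_')[1]), n.split('_')[-1].split('.')[0])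
--             for n in out]
-- ===== Notes on version B (the rewrite author's own statement) =====
-- stated objective: alternative
-- what changed: The per-rank strided slice passes (out_file.extend(file_list[i::world_size])) are replaced by chunking the sorted list into rows of world_size and reading it off column by column, repeatedly emitting every row's head and stripping it until the rows are exhausted; the in-place reformat loop and the sort are kept.
-- outside the precondition, e.g. on get_all_grad_file([], 0): A returns [], B raises ValueError
import Mathlib
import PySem

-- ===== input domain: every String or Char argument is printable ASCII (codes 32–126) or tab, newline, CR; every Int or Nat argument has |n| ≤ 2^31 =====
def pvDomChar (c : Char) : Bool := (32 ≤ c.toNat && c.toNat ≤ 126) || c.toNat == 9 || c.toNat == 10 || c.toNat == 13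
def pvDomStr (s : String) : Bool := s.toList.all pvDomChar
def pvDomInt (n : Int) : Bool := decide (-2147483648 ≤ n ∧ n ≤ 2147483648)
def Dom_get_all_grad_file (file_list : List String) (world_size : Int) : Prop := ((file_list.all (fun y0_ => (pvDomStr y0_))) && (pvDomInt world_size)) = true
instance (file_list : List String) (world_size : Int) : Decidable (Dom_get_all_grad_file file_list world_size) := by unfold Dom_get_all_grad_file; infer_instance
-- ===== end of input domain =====

-- B replaces A's per-rank strided slice passes (file_list[i::world_size]) by chunking the sorted list into
-- rows of world_size and reading the rows off column by column (emit every row's head, strip it, repeat) —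
-- an "alternative" regrouping of the same cost. Both A and B mutate the caller's file_list in place (first
-- reformat loop + sort); the claim is about the return value only.

-- ===== PORT A =====
def pvReformat1 (s : String) : String :=
  let parts := (PySem.Str.split? s "_").getD []
  "iter_" ++ PySem.Str.zfill ((PySem.List.pyGet? parts 1).getD "") 6 ++ "_gpu_" ++
    ((PySem.List.pyGet? ((PySem.Str.split? ((PySem.List.pyGet? parts (-1)).getD "") ".").getD []) 0).getD "") ++ ".pt"

def pvReformat2 (s : String) : String :=
  let parts := (PySem.Str.split? s "_").getD []
  "iter_" ++ PySem.Int.toStr ((PySem.Int.ofStr? ((PySem.List.pyGet? parts 1).getD "")).getD 0) ++ "_gpu_" ++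
    ((PySem.List.pyGet? ((PySem.Str.split? ((PySem.List.pyGet? parts (-1)).getD "") ".").getD []) 0).getD "") ++ ".pt"

def get_all_grad_file (file_list : List String) (world_size : Int) : List String :=
  -- for i in range(len(file_list)): file_list[i] = f"iter_{…}" — in-place elementwise rewrite = map
  let fl := file_list.map pvReformat1
  let fl := PySem.List.sorted fl (fun s => s) false
  -- out_file = []; for i in range(world_size): out_file.extend(file_list[i::world_size])
  let out := (PySem.List.pyRange 0 world_size 1).foldl
      (fun acc i => acc ++ (PySem.List.slice? fl (some i) none world_size).getD []) []
  -- (the assert holds on Pre_) for i in …: out_file[i] = f"iter_{int(…)}…" — in-place rewrite = map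
  out.map pvReformat2

-- ===== PORT B =====
-- it, gpu = name.split('_')[1], name.split('_')[-1].split('.')[0]
def pvParse (s : String) : String × String :=
  let parts := (PySem.Str.split? s "_").getD []
  ((PySem.List.pyGet? parts 1).getD "",
   (PySem.List.pyGet? ((PySem.Str.split? ((PySem.List.pyGet? parts (-1)).getD "") ".").getD []) 0).getD "")

def pvRename (s : String) : String :=
  "iter_" ++ PySem.Str.zfill (pvParse s).1 6 ++ "_gpu_" ++ (pvParse s).2 ++ ".pt"

def pvFinal (s : String) : String :=
  "iter_" ++ PySem.Int.toStr ((PySem.Int.ofStr? (pvParse s).1).getD 0) ++ "_gpu_" ++ (pvParse s).2 ++ ".pt"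

def pvColMeasure (rows : List (List String)) : Nat :=
  (rows.map List.length).sum + rows.length

-- rows = [row[1:] for row in rows if len(row) > 1]
def pvStrip (rows : List (List String)) : List (List String) :=
  (rows.filter (fun row => decide ((1 : Int) < (row.length : Int)))).map
    (fun row => PySem.List.slice row (some 1) none)

-- termination of the while loop: stripping the first column strictly shrinks the measure
lemma pvColMeasure_lt (rows : List (List String)) (h : rows ≠ []) :
    pvColMeasure (pvStrip rows) < pvColMeasure rows := by
  have key : ∀ (l : List (List String)),
      pvColMeasure (pvStrip l) ≤ (l.map List.length).sum := by
    intro l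
    induction l with
    | nil => simp [pvColMeasure, pvStrip]
    | cons r t ih =>
      unfold pvStrip at *
      by_cases hr : ((1 : Int) < (r.length : Int))
      · rw [List.filter_cons, if_pos (by simpa using hr), List.map_cons]
        have hstep : ∀ (a : List String) (L : List (List String)),
            pvColMeasure (a :: L) = a.length + 1 + pvColMeasure L := by
          intro a L; simp [pvColMeasure]; omega
        rw [hstep, PySem.List.slice_from_one, List.length_tail]
        simp only [List.map_cons, List.sum_cons]
        have h2 : (2:Int) ≤ (r.length : Int) := by omega
        have h2' : 2 ≤ r.length := by exact_mod_cast h2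
        omega
      · rw [List.filter_cons, if_neg (by simpa using hr)]
        simp only [List.map_cons, List.sum_cons]
        omega
  have h1 : 1 ≤ rows.length := by
    cases rows with | nil => exact absurd rfl h | cons a t => simp
  have := key rows
  unfold pvColMeasure at *
  omega

-- while rows: out += [row[0] for row in rows]; rows = [row[1:] for row in rows if len(row) > 1]
def pvColumns (rows : List (List String)) : List String :=
  if rows = [] then []
  else
    rows.map (fun row => (PySem.List.pyGet? row 0).getD "")
      ++ pvColumns (pvStrip rows)
termination_by pvColMeasure rows
decreasing_by exact pvColMeasure_lt rows (by assumption)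

def get_all_grad_file_alt (file_list : List String) (world_size : Int) : List String :=
  -- for i, name in enumerate(file_list): … — in-place elementwise rewrite = map
  let fl := PySem.List.sorted (file_list.map pvRename) (fun s => s) false
  -- rows = [file_list[j:j + world_size] for j in range(0, len(file_list), world_size)]
  let rows := (PySem.List.pyRange 0 (fl.length : Int) world_size).map
      (fun j => PySem.List.slice fl (some j) (some (j + world_size)))
  -- while rows: … (pvColumns), then the final list comprehension = map
  (pvColumns rows).map pvFinal

-- ===== PRECONDITION & SPEC =====
-- Pre_ = where Python A returns AND Python B returns: each name splits on '_' into ≥ 2 fields (else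
-- IndexError in both) and the zero-filled second field parses with int() (else ValueError in A's last
-- pass); world_size ≥ 1 unless the list is empty (on a non-empty list a non-positive world_size makes
-- A's assert fail); the single corner ([], world_size = 0), where A happens to return [] because its
-- empty range never slices, is excluded because B's chunking step (range with step 0) raises ValueError.
def Pre_get_all_grad_file (file_list : List String) (world_size : Int) : Prop :=
  (1 ≤ world_size ∨ (file_list = [] ∧ world_size ≠ 0)) ∧
  ∀ s ∈ file_list, 2 ≤ ((PySem.Str.split? s "_").getD []).length ∧
    (PySem.Int.ofStr? (PySem.Str.zfill (((PySem.Str.split? s "_").getD []).getD 1 "") 6)).isSome = true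
instance (file_list : List String) (world_size : Int) : Decidable (Pre_get_all_grad_file file_list world_size) := by
  unfold Pre_get_all_grad_file; infer_instance

def pvWitness_get_all_grad_file : List String × Int :=
  (["iter_3_gpu_0.pt", "iter_12_gpu_1.pt", "iter_3_gpu_1.pt"], 2)

def Spec_get_all_grad_file (file_list : List String) (world_size : Int) (out : List String) : Prop := out = get_all_grad_file_alt file_list world_size
instance (file_list : List String) (world_size : Int) (out : List String) : Decidable (Spec_get_all_grad_file file_list world_size out) := by unfold Spec_get_all_grad_file; infer_instance

-- ===== CLAIM (what is proved, stated in full; the proofs are below) =====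
def Claim_equal_get_all_grad_file : Prop := ∀ (file_list : List String) (world_size : Int), Dom_get_all_grad_file file_list world_size → Pre_get_all_grad_file file_list world_size → Spec_get_all_grad_file file_list world_size (get_all_grad_file file_list world_size)

-- ===== LEMMAS AND PROOFS =====

-- the two reformatters are the same string computations, just decomposed differently
lemma pvRename_eq : pvRename = pvReformat1 := by
  funext s; simp [pvRename, pvParse, pvReformat1]

lemma pvFinal_eq : pvFinal = pvReformat2 := by
  funext s; simp [pvFinal, pvParse, pvReformat2]

-- the elements of xs whose index is ≡ i (mod ws): the common normal form of A's slice xs[i::ws]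
-- and of B's column i
def pvStride (xs : List String) (i ws : Int) : List String :=
  ((PySem.List.enumerate xs 0).filter (fun p => p.1 % ws == i)).map (·.2)

lemma pvStride_nil (i ws : Int) : pvStride [] i ws = [] := by
  simp [pvStride, PySem.List.enumerate_nil]

lemma pvStride_append (xs : List String) (x : String) (i ws : Int) :
    pvStride (xs ++ [x]) i ws
      = pvStride xs i ws ++ (if ((xs.length : Int) % ws == i) then [x] else []) := by
  simp only [pvStride, PySem.List.enumerate_append, PySem.List.enumerate_cons,
    PySem.List.enumerate_nil, List.filter_append, List.map_append]
  by_cases h : ((0 + (xs.length : Int)) % ws == i) <;> simp_all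

lemma core (w : Nat) (hw : 0 < w) (i : Nat) (hi : i < w) (xs : List String) :
    (List.range (if i < xs.length then (xs.length - i + w - 1)/w else 0)).filterMap
        (fun k => xs[i + w * k]?)
      = pvStride xs (i : Int) (w : Int) := by
  induction xs using List.reverseRecOn with
  | nil => simp [pvStride_nil]
  | append_singleton xs x ih =>
    have hlen : (xs ++ [x]).length = xs.length + 1 := by simp
    set n := xs.length with hn
    have hlast : (xs ++ [x])[n]? = some x := by rw [hn]; exact List.getElem?_concat_length
    rw [pvStride_append, hlen]
    by_cases hin : i < n
    case neg =>
      rw [if_neg hin] at ih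
      simp only [List.range_zero, List.filterMap_nil] at ih
      rw [← ih]
      by_cases heq : i = n
      · have hcond : (((n : Int)) % (w : Int) == (i : Int)) = true := by
          have h1 : ((n : Int)) % (w : Int) = ((n % w : Nat) : Int) := (Int.natCast_mod n w).symm
          have h2 : n % w = n := Nat.mod_eq_of_lt (by omega)
          simp [h1, h2, heq]
        rw [hcond, if_pos (by omega : i < n + 1)]
        have hc1 : (n + 1 - i + w - 1) / w = 1 := by
          have e1 : n + 1 - i + w - 1 = w * 1 + 0 := by omega
          rw [e1, Nat.mul_add_div hw]; simp
        rw [hc1]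
        simp only [List.range_one, List.filterMap_cons]
        have e2 : i + w * 0 = n := by omega
        rw [e2, hlast]
        simp
      · have hcond : (((n : Int)) % (w : Int) == (i : Int)) = false := by
          have h1 : ((n : Int)) % (w : Int) = ((n % w : Nat) : Int) := (Int.natCast_mod n w).symm
          have h2 : n % w = n := Nat.mod_eq_of_lt (by omega)
          simp [h1, h2]; omega
        rw [hcond, if_neg (by omega : ¬ i < n + 1)]
        simp
    case pos =>
      rw [if_pos (by omega : i < n + 1), if_pos hin] at *
      obtain ⟨q, r, hr, hqr⟩ : ∃ q r, r < w ∧ n - i = w * q + r :=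
        ⟨(n - i)/w, (n-i) % w, Nat.mod_lt _ hw, (Nat.div_add_mod _ _).symm⟩
      have hcount_new : (n + 1 - i + w - 1)/w = q + 1 := by
        have e1 : n + 1 - i + w - 1 = w * q + w + r := by omega
        have e2 : w * q + w + r = w * (q + 1) + r := by ring
        rw [e1, e2, Nat.mul_add_div hw, Nat.div_eq_of_lt hr]
      rw [hcount_new]
      rcases Nat.eq_zero_or_pos r with h0 | h0
      · have hq1 : 0 < q := by
          rcases Nat.eq_zero_or_pos q with hq | hq
          · exfalso; rw [hq, Nat.mul_zero] at hqr; omega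
          · exact hq
        have hcount_old : (n - i + w - 1)/w = q := by
          have e1 : n - i + w - 1 = w * q + (w - 1) := by omega
          rw [e1, Nat.mul_add_div hw, Nat.div_eq_of_lt (by omega)]
          omega
        rw [hcount_old] at ih
        rw [List.range_succ, List.filterMap_append]
        have hcongr : ∀ k ∈ List.range q, (xs ++ [x])[i + w * k]? = xs[i + w * k]? := by
          intro k hk
          rw [List.mem_range] at hk
          apply List.getElem?_append_left
          have h2 : w * k + w ≤ w * q := by
            calc w * k + w = w * (k + 1) := by ring
            _ ≤ w * q := Nat.mul_le_mul_left _ (by omega)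
          omega
        rw [List.filterMap_congr hcongr, ih]
        have hidx : i + w * q = n := by omega
        have hcond : (((n : Int)) % (w : Int) == (i : Int)) = true := by
          have h1 : ((n : Int)) % (w : Int) = ((n % w : Nat) : Int) := (Int.natCast_mod n w).symm
          have h2 : n % w = i := by
            have e3 : n = i + w * q := by omega
            rw [e3, Nat.add_mul_mod_self_left, Nat.mod_eq_of_lt hi]
          simp [h1, h2]
        rw [hcond]
        simp only [List.filterMap_cons]
        rw [hidx, hlast]
        simp
      · have hcount_old : (n - i + w - 1)/w = q + 1 := by
          have e1 : n - i + w - 1 = w * q + (w + (r - 1)) := by omega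
          have e2 : w * q + (w + (r - 1)) = w * (q + 1) + (r - 1) := by ring
          rw [e1, e2, Nat.mul_add_div hw, Nat.div_eq_of_lt (by omega)]
        rw [hcount_old] at ih
        have hcongr : ∀ k ∈ List.range (q+1), (xs ++ [x])[i + w * k]? = xs[i + w * k]? := by
          intro k hk
          rw [List.mem_range] at hk
          apply List.getElem?_append_left
          have h2 : w * k ≤ w * q := Nat.mul_le_mul_left _ (by omega)
          omega
        rw [List.filterMap_congr hcongr, ih]
        have hcond : (((n : Int)) % (w : Int) == (i : Int)) = false := by
          have h1 : ((n : Int)) % (w : Int) = ((n % w : Nat) : Int) := (Int.natCast_mod n w).symm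
          have h2 : n % w = (i + r) % w := by
            have e3 : n = (i + r) + w * q := by omega
            rw [e3, Nat.add_mul_mod_self_left]
          have h3 : (i + r) % w ≠ i := by
            by_cases hiw2 : i + r < w
            · rw [Nat.mod_eq_of_lt hiw2]; omega
            · have e4 : (i + r) % w = i + r - w := by
                rw [Nat.mod_eq_sub_mod (by omega), Nat.mod_eq_of_lt (by omega)]
              omega
          have h4 : n % w ≠ i := by rw [h2]; exact h3
          rw [h1]
          simp only [beq_eq_false_iff_ne, ne_eq, Int.natCast_inj]
          exact h4
        rw [hcond]
        simp

lemma sliceA (ws : Int) (hws : 1 ≤ ws) (k : Nat) (xs : List String) (hk : k < ws.toNat) :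
    (PySem.List.slice? xs (some ((k : Nat) : Int)) none ws).getD [] = pvStride xs (k : Int) ws := by
  set W := ws.toNat with hWdef
  have hW : 0 < W := by omega
  have hwsW : ws = (W : Int) := by omega
  set n := xs.length with hn
  rw [hwsW, ← core W hW k hk xs]
  simp only [PySem.List.slice?, PySem.List.sliceIndices]
  rw [if_neg (by omega : ¬ ((W:Nat):Int) = 0)]
  simp only [if_neg (by omega : ¬ ((W:Nat):Int) < 0), if_pos (by omega : (0:Int) < ((W:Nat):Int)),
    if_neg (by omega : ¬ ((k:Int)) < 0)]
  rw [Option.getD_some]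
  by_cases hkn : k < n
  · have hmin : min ((k:Int)) ((n:Int)) = (k:Int) := by omega
    rw [hmin]
    have hcnt : (if ((k:Int)) < ((n:Int)) then ((((n:Int)) - ((k:Int)) + ((W:Nat):Int) - 1) / ((W:Nat):Int)).toNat else 0)
        = (if k < n then (n - k + W - 1)/W else 0) := by
      rw [if_pos (by omega : ((k:Int)) < ((n:Int))), if_pos hkn]
      have e1 : ((n:Int)) - ((k:Int)) + ((W:Nat):Int) - 1 = ((n - k + W - 1 : Nat) : Int) := by omega
      rw [e1]
      norm_cast
    rw [hcnt]
    apply List.filterMap_congr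
    intro j hj
    have e2 : ((k:Int)) + ((W:Nat):Int) * ((j:Nat):Int) = ((k + W * j : Nat) : Int) := by
      push_cast; ring
    rw [e2, Int.toNat_natCast]
  · have hmin : min ((k:Int)) ((n:Int)) = (n:Int) := by omega
    rw [hmin]
    rw [if_neg (by omega : ¬ ((n:Int)) < ((n:Int))), if_neg hkn]
    simp

-- padding: a filterMap over a long enough index range does not depend on the exact length
lemma filterMap_range_pad {α : Type} (f : Nat → Option α) (N M : Nat) (hNM : N ≤ M)
    (hf : ∀ k, N ≤ k → f k = none) :
    (List.range M).filterMap f = (List.range N).filterMap f := by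
  induction M with
  | zero => have : N = 0 := by omega
            rw [this]
  | succ m ih =>
    by_cases h : N = m + 1
    · rw [h]
    · have hNm : N ≤ m := by omega
      rw [List.range_succ, List.filterMap_append, ih hNm]
      simp [hf m hNm]

-- B's column r of the chunk rows IS A's stride r
lemma stride_eq_filterMap_rows (xs : List String) (W : Nat) (hW : 0 < W) (r : Nat) (hr : r < W)
    (M : Nat) (hM : M = (if (0:Int) < (xs.length : Int) then (((xs.length : Int) - 0 + W - 1) / (W : Int)).toNat else 0)) :
    ((List.range M).map (fun m => (xs.drop (W * m)).take W)).filterMap (fun row => row[r]?)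
      = pvStride xs (r : Int) (W : Int) := by
  set n := xs.length with hn
  rw [List.filterMap_map]
  have hfun : ∀ m ∈ List.range M, ((fun row => row[r]?) ∘ (fun m => (xs.drop (W * m)).take W)) m
      = xs[r + W * m]? := by
    intro m _
    simp only [Function.comp]
    rw [List.getElem?_take, if_pos hr, List.getElem?_drop]
    congr 1
    omega
  rw [List.filterMap_congr hfun]
  -- exact count used by `core`
  set N := (if r < n then (n - r + W - 1)/W else 0) with hN
  have hceil : ∀ a : Nat, a ≤ W * ((a + W - 1)/W) := by
    intro a
    have h1 : (a + W - 1) % W < W := Nat.mod_lt _ hW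
    have h2 : W * ((a + W - 1)/W) + (a + W - 1) % W = a + W - 1 := Nat.div_add_mod _ _
    omega
  have hnone : ∀ k, N ≤ k → xs[r + W * k]? = none := by
    intro k hk
    apply List.getElem?_eq_none
    by_cases hrn : r < n
    · have hNval : N = (n - r + W - 1)/W := by rw [hN, if_pos hrn]
      have hle : n - r ≤ W * N := by rw [hNval]; exact hceil (n - r)
      have hmono : W * N ≤ W * k := Nat.mul_le_mul_left _ hk
      omega
    · omega
  have hMN : N ≤ M := by
    by_cases hrn : r < n
    · have hn0 : (0:Int) < (n : Int) := by exact_mod_cast (by omega : 0 < n)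
      have hM' : M = (n + W - 1)/W := by
        rw [hM, if_pos hn0]
        have e1 : ((n:Int)) - 0 + (W:Int) - 1 = ((n + W - 1 : Nat) : Int) := by omega
        rw [e1]
        norm_cast
      rw [hN, if_pos hrn, hM']
      exact Nat.div_le_div_right (by omega)
    · rw [hN, if_neg hrn]; omega
  rw [filterMap_range_pad _ N M hMN hnone]
  rw [← core W hW r hr xs, ← hn, ← hN]

-- the column-stripping while loop reads off the columns 0..W-1 of the rows
lemma pvColumns_eq_cols : ∀ (n : Nat) (rows : List (List String)) (W : Nat),
    pvColMeasure rows ≤ n → (∀ row ∈ rows, row ≠ [] ∧ row.length ≤ W) →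
    pvColumns rows = (List.range W).flatMap (fun r => rows.filterMap (fun row => row[r]?)) := by
  intro n
  induction n with
  | zero =>
    intro rows W hμ _
    have hrows : rows = [] := by
      cases rows with
      | nil => rfl
      | cons a t => exfalso; unfold pvColMeasure at hμ; simp at hμ
    subst hrows
    rw [pvColumns.eq_def]
    simp
  | succ n ih =>
    intro rows W hμ hrow
    by_cases hnil : rows = []
    · subst hnil; rw [pvColumns.eq_def]; simp
    · rw [pvColumns.eq_def, if_neg hnil]
      have hW1 : 1 ≤ W := by
        cases rows with
        | nil => exact absurd rfl hnil
        | cons a t =>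
          have := hrow a (by simp)
          have : 1 ≤ a.length := by
            rcases this with ⟨h1, _⟩
            cases a with | nil => exact absurd rfl h1 | cons x xs => simp
          have := (hrow a (by simp)).2
          omega
      set rows' := pvStrip rows with hrows'
      have hμ' : pvColMeasure rows' ≤ n := by
        have := pvColMeasure_lt rows hnil
        rw [← hrows'] at this
        omega
      have hrow' : ∀ row ∈ rows', row ≠ [] ∧ row.length ≤ W - 1 := by
        intro row hmem
        rw [hrows'] at hmem
        unfold pvStrip at hmem
        simp only [List.mem_map, List.mem_filter] at hmem
        obtain ⟨r0, ⟨hr0mem, hr0len⟩, hr0eq⟩ := hmem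
        have hlen : (1 : Int) < (r0.length : Int) := by simpa using hr0len
        have h2 : 2 ≤ r0.length := by exact_mod_cast (by omega : (2:Int) ≤ (r0.length : Int))
        rw [← hr0eq, PySem.List.slice_from_one]
        constructor
        · intro hc
          have := congrArg List.length hc
          rw [List.length_tail] at this
          simp at this
          omega
        · rw [List.length_tail]
          have := (hrow r0 hr0mem).2
          omega
      rw [ih rows' (W - 1) hμ' hrow']
      -- now assemble the columns
      have hWsplit : W = (W - 1) + 1 := by omega
      rw [hWsplit, List.range_succ_eq_map]
      simp only [List.flatMap_cons, List.flatMap_map]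
      congr 1
      · -- column 0 = the heads
        have hcongr : ∀ row ∈ rows, (fun row => row[0]?) row
            = (some ∘ (fun row => (PySem.List.pyGet? row 0).getD "")) row := by
          intro row hmem
          obtain ⟨hne, _⟩ := hrow row hmem
          cases row with
          | nil => exact absurd rfl hne
          | cons a t => simp [PySem.List.pyGet?_zero]
        rw [List.filterMap_congr hcongr, List.filterMap_eq_map]
      · -- columns r+1 of rows = columns r of rows'
        apply List.flatMap_congr
        intro r _
        rw [hrows']
        unfold pvStrip
        rw [List.filterMap_map]
        have he : ∀ row : List String, ((fun row => row[r]?) ∘ (fun row => PySem.List.slice row (some 1) none)) row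
            = row.tail[r]? := by
          intro row; simp [PySem.List.slice_from_one]
        simp only [he]
        rw [List.filterMap_filter]
        apply List.filterMap_congr
        intro row hmem
        by_cases hp : ((1 : Int) < (row.length : Int))
        · simp only [hp, decide_true, if_pos]
          rw [List.getElem?_tail]
        · simp only [hp, decide_false]
          rw [if_neg (by simp)]
          symm
          apply List.getElem?_eq_none
          have h1 : (row.length : Int) ≤ 1 := by omega
          have h2 : row.length ≤ 1 := by exact_mod_cast h1
          omega

lemma pyRange_self_eq_nil (a s : Int) : PySem.List.pyRange a a s = [] := by
  simp [PySem.List.pyRange]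

theorem main_eq : ∀ (file_list : List String) (world_size : Int),
    (1 ≤ world_size ∨ (file_list = [] ∧ world_size ≠ 0)) →
    get_all_grad_file file_list world_size = get_all_grad_file_alt file_list world_size := by
  intro fl ws hpre
  by_cases hws : 1 ≤ ws
  case neg =>
    have hnil : fl = [] := by tauto
    subst hnil
    have hr : PySem.List.pyRange 0 ws 1 = [] := PySem.List.pyRange_one_eq_nil (by omega)
    have hs : PySem.List.sorted ([] : List String) (fun s => s) false = [] := rfl
    simp only [get_all_grad_file, get_all_grad_file_alt, List.map_nil, hs, hr,
      List.foldl_nil, List.length_nil, Int.natCast_zero, pyRange_self_eq_nil, List.map_nil]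
    rw [pvColumns.eq_def]
    simp
  case pos =>
    set W := ws.toNat with hWdef
    have hW : 0 < W := by omega
    have hwsW : ws = (W : Int) := by omega
    simp only [get_all_grad_file, get_all_grad_file_alt]
    rw [pvRename_eq, pvFinal_eq]
    set gl := PySem.List.sorted (fl.map pvReformat1) (fun s => s) false with hgl
    set n := gl.length with hn
    -- A side: foldl of appends = flatMap of slices = flatMap of strides
    rw [PySem.List.foldl_append_eq_flatMap, List.nil_append, PySem.List.pyRange_one,
      List.flatMap_map]
    have hA : ∀ k ∈ List.range (ws - 0).toNat,
        (PySem.List.slice? gl (some ((0:Int) + (k:Nat))) none ws).getD []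
          = pvStride gl (k:Int) ws := by
      intro k hk
      rw [List.mem_range] at hk
      have : ((0:Int) + (k:Nat)) = ((k:Nat):Int) := by omega
      rw [this]
      exact sliceA ws hws k gl (by omega)
    rw [List.flatMap_congr hA]
    have hWW : (ws - 0).toNat = W := by omega
    rw [hWW]
    -- B side: rows are the chunks of gl
    set M := (if (0:Int) < (n : Int) then (((n : Int) - 0 + W - 1) / (W : Int)).toNat else 0) with hM
    have hrows : (PySem.List.pyRange 0 (n : Int) ws).map
        (fun j => PySem.List.slice gl (some j) (some (j + ws)))
        = (List.range M).map (fun m => (gl.drop (W * m)).take W) := by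
      rw [hwsW, PySem.List.pyRange_of_pos 0 ((n : Nat) : Int) (by exact_mod_cast hW : (0:Int) < ((W:Nat):Int)), List.map_map]
      rw [← hM]
      apply List.map_congr_left
      intro m _
      simp only [Function.comp]
      have e1 : (0 : Int) + (W : Int) * (m : Int) = ((W * m : Nat) : Int) := by push_cast; ring
      rw [e1]
      exact PySem.List.slice_natCast_add gl (W * m) W
    rw [hrows]
    -- every chunk row is nonempty of length ≤ W
    have hrowcond : ∀ row ∈ (List.range M).map (fun m => (gl.drop (W * m)).take W),
        row ≠ [] ∧ row.length ≤ W := by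
      intro row hmem
      simp only [List.mem_map, List.mem_range] at hmem
      obtain ⟨m, hm, hrow⟩ := hmem
      have hMn : W * m < n := by
        by_cases hn0 : 0 < n
        · rw [hM, if_pos (by exact_mod_cast hn0)] at hm
          have e1 : ((n:Int)) - 0 + (W:Int) - 1 = ((n + W - 1 : Nat) : Int) := by omega
          rw [e1, ← Int.natCast_div, Int.toNat_natCast] at hm
          have h2 : W * (m + 1) ≤ W * ((n + W - 1)/W) := Nat.mul_le_mul_left _ hm
          rw [Nat.mul_succ] at h2
          have h3 : W * ((n + W - 1)/W) + (n + W - 1) % W = n + W - 1 := Nat.div_add_mod _ _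
          omega
        · rw [hM, if_neg (by omega : ¬ (0:Int) < (n:Int))] at hm
          omega
      constructor
      · rw [← hrow]
        intro hc
        have := congrArg List.length hc
        rw [List.length_take, List.length_drop] at this
        simp at this
        omega
      · rw [← hrow, List.length_take]
        omega
    rw [pvColumns_eq_cols (pvColMeasure ((List.range M).map (fun m => (gl.drop (W * m)).take W)))
      _ W (le_refl _) hrowcond]
    -- columns = strides
    rw [List.map_flatMap, List.map_flatMap]
    apply List.flatMap_congr
    intro r hr
    rw [List.mem_range] at hr
    congr 1
    rw [stride_eq_filterMap_rows gl W hW r hr M (by rw [hM, hn]), hwsW]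

-- ===== VERDICT (by name: the statement is the Claim_ definition above) =====
theorem get_all_grad_file_spec : Claim_equal_get_all_grad_file := by
  intro file_list world_size _ hpre
  unfold Spec_get_all_grad_file
  exact main_eq file_list world_size hpre.1
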